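-- pv_equiv track=rewrite | github.com/bmkamath2000/django1 | MultiAppProj/app1/views.py | arrayfact
-- ===== SOURCE A (Python) =====
-- def fact(n1):
--     result = 1
--     for i in range(1,1+n1,1):
--         result = result * i
--     return result
--
-- def arrayfact(n1):
--     list1 = []
--     list2 = []
--     result = 1
--     for i in range(1,n1+1,1):
--         result = fact(i)
--         list1.append(result)
--         list2.append(i)
--     return zip(list2,list1)
-- ===== SOURCE B (Python) =====
-- def arrayfact(n1):
--     result = 1
--     pairs = []
--     for i in range(1, n1 + 1):
--         result = result * i
--         pairs.append((i, result))
--     return pairs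
-- ===== Notes on version B (the rewrite author's own statement) =====
-- stated objective: faster
-- what changed: B maintains the running factorial incrementally in a single pass and builds the (i, i!) pairs directly, instead of recomputing fact(i) from 1 each iteration and zipping two parallel lists.
import Mathlib
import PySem

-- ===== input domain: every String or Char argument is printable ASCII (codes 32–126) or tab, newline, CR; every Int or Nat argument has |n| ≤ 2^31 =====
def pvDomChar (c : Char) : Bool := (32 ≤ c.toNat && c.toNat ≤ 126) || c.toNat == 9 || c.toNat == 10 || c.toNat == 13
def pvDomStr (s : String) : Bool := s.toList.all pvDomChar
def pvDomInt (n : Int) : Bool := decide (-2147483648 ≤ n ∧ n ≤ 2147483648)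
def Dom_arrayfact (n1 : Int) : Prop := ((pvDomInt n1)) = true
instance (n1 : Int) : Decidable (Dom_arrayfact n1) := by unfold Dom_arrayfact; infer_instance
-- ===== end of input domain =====

-- B replaces A's per-iteration recomputation of fact(i) (O(n^2)) by a single pass with a
-- running product, building the (i, i!) pairs directly (O(n)); A returns a lazy zip over two
-- parallel lists, B a list of the same pairs — equal as List (Int × Int) values.


-- ===== PORT A =====
def fact (n1 : Int) : Int :=
  (PySem.List.pyRange 1 (1 + n1) 1).foldl (fun result i => result * i) 1

def arrayfact (n1 : Int) : List (Int × Int) :=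
  let st :=
    (PySem.List.pyRange 1 (n1 + 1) 1).foldl
      (fun (st : List Int × List Int × Int) i =>
        let result := fact i
        (st.1 ++ [result], st.2.1 ++ [i], result))
      ([], [], 1)
  st.2.1.zip st.1

-- ===== PORT B =====
def arrayfact_alt (n1 : Int) : List (Int × Int) :=
  ((PySem.List.pyRange 1 (n1 + 1) 1).foldl
      (fun (st : Int × List (Int × Int)) i =>
        let result := st.1 * i
        (result, st.2 ++ [(i, result)]))
      (1, [])).2

-- ===== PRECONDITION & SPEC =====
def Spec_arrayfact (n1 : Int) (out : List (Int × Int)) : Prop := out = arrayfact_alt n1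
instance (n1 : Int) (out : List (Int × Int)) : Decidable (Spec_arrayfact n1 out) := by unfold Spec_arrayfact; infer_instance

-- ===== CLAIM (what is proved, stated in full; the proofs are below) =====
def Claim_equal_arrayfact : Prop := ∀ (n1 : Int), Dom_arrayfact n1 → Spec_arrayfact n1 (arrayfact n1)

-- ===== LEMMAS AND PROOFS =====

theorem fact_succ (m : Nat) : fact ((m : Int) + 1) = fact m * ((m : Int) + 1) := by
  unfold fact
  have h : PySem.List.pyRange 1 (1 + ((m : Int) + 1)) 1
      = PySem.List.pyRange 1 (1 + (m : Int)) 1 ++ [1 + (m : Int)] := by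
    have := PySem.List.pyRange_one_succ_right (a := 1) (b := 1 + (m : Int)) (by omega)
    rw [show (1 : Int) + ((m : Int) + 1) = (1 + (m : Int)) + 1 by ring, this]
  rw [h, List.foldl_append]
  simp only [List.foldl]
  ring

theorem A_fold (m : Nat) :
    (PySem.List.pyRange 1 ((m : Int) + 1) 1).foldl
      (fun (st : List Int × List Int × Int) i =>
        ((st.1 ++ [fact i], st.2.1 ++ [i], fact i)))
      ([], [], 1)
    = ((List.range m).map (fun j => fact ((j : Int) + 1)),
       (List.range m).map (fun j => ((j : Int) + 1)),
       fact m) := by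
  induction m with
  | zero => simp [PySem.List.pyRange_one_eq_nil, fact]
  | succ k ih =>
    have h : PySem.List.pyRange 1 (((k : Nat) + 1 : Nat) + 1) 1
        = PySem.List.pyRange 1 ((k : Int) + 1) 1 ++ [(k : Int) + 1] := by
      have := PySem.List.pyRange_one_succ_right (a := 1) (b := (k : Int) + 1) (by omega)
      rw [show ((((k : Nat) + 1 : Nat) : Int) + 1) = ((k : Int) + 1) + 1 by push_cast; ring, this]
    rw [h, List.foldl_append, ih]
    simp [List.range_succ, fact_succ]

theorem B_fold (m : Nat) :
    (PySem.List.pyRange 1 ((m : Int) + 1) 1).foldl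
      (fun (st : Int × List (Int × Int)) i =>
        (st.1 * i, st.2 ++ [(i, st.1 * i)]))
      (1, [])
    = (fact m, (List.range m).map (fun j => ((j : Int) + 1, fact ((j : Int) + 1)))) := by
  induction m with
  | zero => simp [PySem.List.pyRange_one_eq_nil, fact]
  | succ k ih =>
    have h : PySem.List.pyRange 1 (((k : Nat) + 1 : Nat) + 1) 1
        = PySem.List.pyRange 1 ((k : Int) + 1) 1 ++ [(k : Int) + 1] := by
      have := PySem.List.pyRange_one_succ_right (a := 1) (b := (k : Int) + 1) (by omega)
      rw [show ((((k : Nat) + 1 : Nat) : Int) + 1) = ((k : Int) + 1) + 1 by push_cast; ring, this]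
    rw [h, List.foldl_append, ih]
    simp [List.range_succ, fact_succ]

-- ===== VERDICT (by name: the statement is the Claim_ definition above) =====
theorem arrayfact_spec : Claim_equal_arrayfact := by
  intro n1 _
  unfold Spec_arrayfact arrayfact arrayfact_alt
  by_cases hn : n1 + 1 ≤ 1
  · rw [PySem.List.pyRange_one_eq_nil hn]
    simp
  · have h0 : 0 ≤ n1 := by omega
    have hm : ((n1.toNat : Int)) = n1 := Int.toNat_of_nonneg h0
    rw [← hm, A_fold n1.toNat, B_fold n1.toNat]
    simp [List.zip_map']
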